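-- pv_equiv track=rewrite | github.com/chulsea/TIL | algorithm/Python/algorithm/swexport/d3/hiking.py | __dfs
-- ===== SOURCE A (Python) =====
-- dx = [0, 0, -1, 1]
--
-- dy = [-1, 1, 0, 0]
--
-- def __is_wall(n, x, y):
--     return x < 0 or x >= n or y < 0 or y >= n
--
-- def __dfs(arr, n, x, y, k, s):
--     if __is_wall(n, x, y):
--         return 0
--     max_l = 0
--     for i in range(4):
--         l = 0
--         ny = y + dy[i]
--         nx = x + dx[i]
--         if not __is_wall(n, nx, ny):
--             if k != 0 and s == 0 and arr[ny][nx] < arr[y][x] - k: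
--                 l += __dfs(arr, n, nx, ny, 0, 0) + 1
--             elif arr[ny][nx] < arr[y][x]:
--                 l += __dfs(arr, n, nx, ny, k, s) + 1
--             elif k != 0 and s != 0 and arr[ny][nx] - k < arr[y][x]:
--                 l += __dfs(arr, n, nx, ny, k, 0) + 1
--         max_l = max(max_l, l)
--     return max_l
-- ===== SOURCE B (Python) =====
-- def __dfs(arr, n, x, y, k, s):
--     # Bottom-up value iteration instead of top-down DFS: a table T[p][cy][cx] holds the
--     # longest-path value for phase p (0 = dig spent/absent, 1 = dig armed, 2 = dig not
--     # yet armed); one relaxation round per path length, stopping at the fixpoint.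
--     if x < 0 or x >= n or y < 0 or y >= n:
--         return 0
--     T = [[[0] * n for _ in range(n)] for _ in range(3)]
--     for _ in range(3 * n * n + 4):
--         U = [[[best_move(arr, n, k, T, p, cx, cy) for cx in range(n)]
--               for cy in range(n)] for p in range(3)]
--         if U == T:
--             break
--         T = U
--     p0 = 0 if k == 0 else (1 if s == 0 else 2)
--     return T[p0][y][x]
--
-- def best_move(arr, n, k, T, p, cx, cy):
--     h = arr[cy][cx]
--     best = 0
--     for ax, ay in ((cx, cy - 1), (cx, cy + 1), (cx - 1, cy), (cx + 1, cy)):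
--         if 0 <= ax < n and 0 <= ay < n:
--             h2 = arr[ay][ax]
--             if p == 1 and k != 0 and h2 < h - k:
--                 best = max(best, T[0][ay][ax] + 1)
--             elif h2 < h:
--                 best = max(best, T[p][ay][ax] + 1)
--             elif p == 2 and k != 0 and h2 - k < h:
--                 best = max(best, T[1][ay][ax] + 1)
--     return best
-- ===== Notes on version B (the rewrite author's own statement) =====
-- stated objective: alternative
-- what changed: B replaces A's top-down exponential DFS by bottom-up value iteration: it builds a table of longest-path values per (phase, cell) - phase 0 dig spent/absent, 1 dig armed, 2 dig not yet armed - relaxing every cell once per round until the table reaches its fixpoint, then reads the entry of the start state; A instead re-explores the whole path tree recursively.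
-- outside the precondition, e.g. on __dfs([[1, 2], [3]], 2, 0, 0, 0, 0): A returns 0, B raises IndexError
import Mathlib
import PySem

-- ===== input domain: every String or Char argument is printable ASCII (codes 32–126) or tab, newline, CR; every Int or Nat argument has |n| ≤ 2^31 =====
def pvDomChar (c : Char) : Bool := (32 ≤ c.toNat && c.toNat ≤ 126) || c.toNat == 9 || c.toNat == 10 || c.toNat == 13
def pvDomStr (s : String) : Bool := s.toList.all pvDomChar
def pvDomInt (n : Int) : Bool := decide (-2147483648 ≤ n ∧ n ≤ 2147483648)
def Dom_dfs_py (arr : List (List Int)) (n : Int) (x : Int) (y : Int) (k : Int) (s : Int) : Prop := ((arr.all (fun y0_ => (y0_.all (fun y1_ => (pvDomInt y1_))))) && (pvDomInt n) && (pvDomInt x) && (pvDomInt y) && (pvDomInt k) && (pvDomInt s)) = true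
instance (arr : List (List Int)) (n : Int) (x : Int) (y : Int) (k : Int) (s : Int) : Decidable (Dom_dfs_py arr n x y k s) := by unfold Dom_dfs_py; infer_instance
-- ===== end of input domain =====

-- B replaces A's top-down exponential DFS by bottom-up value iteration: a table of
-- longest-path values per (phase, cell) is relaxed once per path length until the
-- fixpoint, then read at the start state (objective: alternative algorithm).

-- ===== PORT A =====
def dxA : List Int := [0, 0, -1, 1]
def dyA : List Int := [-1, 1, 0, 0]

-- port of __is_wall
def isWallA (n x y : Int) : Bool :=
  decide (x < 0) || decide (n ≤ x) || decide (y < 0) || decide (n ≤ y)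

-- arr[row][col]; both Pythons index exactly like this.  Under Pre_dfs_py every index
-- that is read lies in range, so the defaults (Python would raise IndexError) are
-- never observed inside Pre_.
def cellAt (arr : List (List Int)) (row col : Int) : Int :=
  PySem.List.pyGetD (PySem.List.pyGetD arr row []) col 0

-- fuel makes the recursion structurally total; pvFuel n bounds the Python recursion
-- depth (within each of the ≤ 3 (k,s)-phases the height strictly decreases, so a call
-- chain visits at most 3·n² cells), hence inside Pre_ the guard never fires.
def pvFuel (n : Int) : Nat := 3 * n.toNat * n.toNat + 4

def dfsAux (arr : List (List Int)) (n : Int) : Nat → Int → Int → Int → Int → Int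
  | 0, _, _, _, _ => 0
  | f+1, x, y, k, s =>
    if isWallA n x y then 0
    else
      (PySem.List.pyRange 0 4 1).foldl (fun max_l i =>
        let ny := y + PySem.List.pyGetD dyA i 0
        let nx := x + PySem.List.pyGetD dxA i 0
        let l : Int :=
          if !isWallA n nx ny then
            if k ≠ 0 ∧ s = 0 ∧ cellAt arr ny nx < cellAt arr y x - k then
              dfsAux arr n f nx ny 0 0 + 1
            else if cellAt arr ny nx < cellAt arr y x then
              dfsAux arr n f nx ny k s + 1
            else if k ≠ 0 ∧ s ≠ 0 ∧ cellAt arr ny nx - k < cellAt arr y x then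
              dfsAux arr n f nx ny k 0 + 1
            else 0
          else 0
        max max_l l) 0

def dfs_py (arr : List (List Int)) (n : Int) (x : Int) (y : Int) (k : Int) (s : Int) : Int :=
  dfsAux arr n (pvFuel n) x y k s

-- ===== PORT B =====
-- arr[row][col] on B's side (same Python indexing; defaults unobservable inside Pre_)
def cellB (arr : List (List Int)) (row col : Int) : Int :=
  PySem.List.pyGetD (PySem.List.pyGetD arr row []) col 0

-- T[p][ay][ax] (phase p at cell (ax, ay)); out-of-table defaults are never read:
-- every lookup is guarded by the in-range test.
def lookT (T : List (List (List Int))) (p ay ax : Int) : Int :=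
  PySem.List.pyGetD (PySem.List.pyGetD (PySem.List.pyGetD T p []) ay []) ax 0

def movesB (cx cy : Int) : List (Int × Int) :=
  [(cx, cy - 1), (cx, cy + 1), (cx - 1, cy), (cx + 1, cy)]

-- port of best_move
def bestMove (arr : List (List Int)) (n k : Int) (T : List (List (List Int))) (p cx cy : Int) : Int :=
  let h := cellB arr cy cx
  (movesB cx cy).foldl (fun best m =>
    if 0 ≤ m.1 ∧ m.1 < n ∧ 0 ≤ m.2 ∧ m.2 < n then
      let h2 := cellB arr m.2 m.1
      if p = 1 ∧ k ≠ 0 ∧ h2 < h - k then max best (lookT T 0 m.2 m.1 + 1)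
      else if h2 < h then max best (lookT T p m.2 m.1 + 1)
      else if p = 2 ∧ k ≠ 0 ∧ h2 - k < h then max best (lookT T 1 m.2 m.1 + 1)
      else best
    else best) 0

-- one relaxation round: the triple comprehension building U
def stepT (arr : List (List Int)) (n k : Int) (T : List (List (List Int))) : List (List (List Int)) :=
  (PySem.List.pyRange 0 3 1).map (fun p =>
    (PySem.List.pyRange 0 n 1).map (fun cy =>
      (PySem.List.pyRange 0 n 1).map (fun cx => bestMove arr n k T p cx cy)))

-- [[[0]*n for _ in range(n)] for _ in range(3)]  ([0]*n = n.toNat copies; here 0 < n)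
def zeroT (n : Int) : List (List (List Int)) :=
  (PySem.List.pyRange 0 3 1).map (fun _ =>
    (PySem.List.pyRange 0 n 1).map (fun _ => List.replicate n.toNat 0))

-- the 'for _ in range(R): U = …; if U == T: break; T = U' loop, on remaining-round fuel
def iterT (arr : List (List Int)) (n k : Int) : Nat → List (List (List Int)) → List (List (List Int))
  | 0, T => T
  | f+1, T =>
    let U := stepT arr n k T
    if U = T then T else iterT arr n k f U

def dfs_py_alt (arr : List (List Int)) (n : Int) (x : Int) (y : Int) (k : Int) (s : Int) : Int :=
  if x < 0 ∨ n ≤ x ∨ y < 0 ∨ n ≤ y then 0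
  else
    let T := iterT arr n k (3 * n * n + 4).toNat (zeroT n)
    lookT T (if k = 0 then 0 else if s = 0 then 1 else 2) y x

-- ===== PRECONDITION & SPEC =====
-- Pre_ excludes exactly the inputs on which Python's arr[row][col] may raise
-- IndexError: when the start cell lies on the n×n board, every visited index is in
-- [0,n), so a board with at least n rows each of length at least n is safe.  (This is
-- a sufficient closed-form bound; it also excludes some ragged boards on which A
-- happens to return before reading a short row — B reads every cell of the n×n board.)
def Pre_dfs_py (arr : List (List Int)) (n : Int) (x : Int) (y : Int) (k : Int) (s : Int) : Prop :=
  (x < 0 ∨ n ≤ x ∨ y < 0 ∨ n ≤ y) ∨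
  (n ≤ (arr.length : Int) ∧ ∀ row ∈ arr, n ≤ (row.length : Int))

instance (arr : List (List Int)) (n : Int) (x : Int) (y : Int) (k : Int) (s : Int) : Decidable (Pre_dfs_py arr n x y k s) := by unfold Pre_dfs_py; infer_instance

def pvWitness_dfs_py : List (List Int) × Int × Int × Int × Int × Int := ([[3, 1], [2, 0]], 2, 0, 0, 1, 1)

def Spec_dfs_py (arr : List (List Int)) (n : Int) (x : Int) (y : Int) (k : Int) (s : Int) (out : Int) : Prop := out = dfs_py_alt arr n x y k s
instance (arr : List (List Int)) (n : Int) (x : Int) (y : Int) (k : Int) (s : Int) (out : Int) : Decidable (Spec_dfs_py arr n x y k s out) := by unfold Spec_dfs_py; infer_instance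

-- ===== CLAIM (what is proved, stated in full; the proofs are below) =====
def Claim_equal_dfs_py : Prop := ∀ (arr : List (List Int)) (n : Int) (x : Int) (y : Int) (k : Int) (s : Int), Dom_dfs_py arr n x y k s → Pre_dfs_py arr n x y k s → Spec_dfs_py arr n x y k s (dfs_py arr n x y k s)

-- ===== LEMMAS AND PROOFS =====

lemma cellB_eq (arr : List (List Int)) (row col : Int) : cellB arr row col = cellAt arr row col := rfl

lemma inb_iff (n a b : Int) :
    ((!isWallA n a b) = true) ↔ (0 ≤ a ∧ a < n ∧ 0 ≤ b ∧ b < n) := by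
  simp [isWallA]; omega

lemma dfsAux_wall (arr : List (List Int)) (n : Int) (f : Nat) (x y k s : Int)
    (h : isWallA n x y = true) : dfsAux arr n f x y k s = 0 := by
  cases f <;> simp [dfsAux, h]

lemma foldl_eq_inv {α β : Type} (P : β → Prop) (f g : β → α → β) :
    ∀ (l : List α) (acc : β), P acc → (∀ b a, P b → P (g b a)) →
      (∀ b a, P b → f b a = g b a) → l.foldl f acc = l.foldl g acc := by
  intro l
  induction l with
  | nil => intros; rfl
  | cons a t iht =>
    intro acc hP hpres heq
    simp only [List.foldl]
    rw [heq _ _ hP]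
    exact iht _ (hpres _ _ hP) hpres heq

lemma mvEq (x y : Int) :
    movesB x y = ([0, 1, 2, 3] : List Int).map
      (fun i => (x + PySem.List.pyGetD dxA i 0, y + PySem.List.pyGetD dyA i 0)) := by
  have g0 : PySem.List.pyGetD dyA 0 0 = -1 := by decide
  have g1 : PySem.List.pyGetD dyA 1 0 = 1 := by decide
  have g2 : PySem.List.pyGetD dyA 2 0 = 0 := by decide
  have g3 : PySem.List.pyGetD dyA 3 0 = 0 := by decide
  have h0 : PySem.List.pyGetD dxA 0 0 = 0 := by decide
  have h1 : PySem.List.pyGetD dxA 1 0 = 0 := by decide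
  have h2 : PySem.List.pyGetD dxA 2 0 = -1 := by decide
  have h3 : PySem.List.pyGetD dxA 3 0 = 1 := by decide
  simp only [movesB, List.map, g0, g1, g2, g3, h0, h1, h2, h3]
  simp only [List.cons.injEq, Prod.mk.injEq, and_true, true_and]
  omega

-- one fold element: A's direction-i contribution equals B's move-m contribution,
-- under the phase correspondence p ↔ (ks, ss) and the round-f table hypothesis
lemma stepPoint (arr : List (List Int)) (n k : Int) (f : Nat)
    (T : List (List (List Int))) (x y p ks ss nx ny acc : Int)
    (hph : (p = 0 ∧ ks = 0) ∨ (p = 1 ∧ ks = k ∧ k ≠ 0 ∧ ss = 0) ∨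
           (p = 2 ∧ ks = k ∧ k ≠ 0 ∧ ss ≠ 0))
    (hacc : 0 ≤ acc)
    (hIH : ∀ a b : Int, 0 ≤ a ∧ a < n ∧ 0 ≤ b ∧ b < n →
      (∀ s, lookT T 0 b a = dfsAux arr n f a b 0 s) ∧
      (k ≠ 0 → lookT T 1 b a = dfsAux arr n f a b k 0) ∧
      (k ≠ 0 → ∀ s, s ≠ 0 → lookT T 2 b a = dfsAux arr n f a b k s)) :
    max acc (if !isWallA n nx ny then
        (if ks ≠ 0 ∧ ss = 0 ∧ cellAt arr ny nx < cellAt arr y x - ks then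
            dfsAux arr n f nx ny 0 0 + 1
          else if cellAt arr ny nx < cellAt arr y x then dfsAux arr n f nx ny ks ss + 1
          else if ks ≠ 0 ∧ ss ≠ 0 ∧ cellAt arr ny nx - ks < cellAt arr y x then
            dfsAux arr n f nx ny ks 0 + 1
          else 0)
      else 0)
    = (if 0 ≤ nx ∧ nx < n ∧ 0 ≤ ny ∧ ny < n then
        (if p = 1 ∧ k ≠ 0 ∧ cellAt arr ny nx < cellAt arr y x - k then
            max acc (lookT T 0 ny nx + 1)
          else if cellAt arr ny nx < cellAt arr y x then
            max acc (lookT T p ny nx + 1)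
          else if p = 2 ∧ k ≠ 0 ∧ cellAt arr ny nx - k < cellAt arr y x then
            max acc (lookT T 1 ny nx + 1)
          else acc)
      else acc) := by
  by_cases hio : 0 ≤ nx ∧ nx < n ∧ 0 ≤ ny ∧ ny < n
  · rw [if_pos ((inb_iff n nx ny).mpr hio), if_pos hio]
    obtain ⟨h0, h1, h2⟩ := hIH nx ny hio
    rcases hph with ⟨hp, hks⟩ | ⟨hp, hks, hk, hss⟩ | ⟨hp, hks, hk, hss⟩
    · subst hp; subst hks
      have nA1 : ¬((0:Int) ≠ 0 ∧ ss = 0 ∧ cellAt arr ny nx < cellAt arr y x - 0) :=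
        fun h => h.1 rfl
      have nB1 : ¬((0:Int) = 1 ∧ k ≠ 0 ∧ cellAt arr ny nx < cellAt arr y x - k) :=
        fun h => absurd h.1 (by norm_num)
      rw [if_neg nA1, if_neg nB1]
      by_cases hc : cellAt arr ny nx < cellAt arr y x
      · rw [if_pos hc, if_pos hc, h0 ss]
      · have nA3 : ¬((0:Int) ≠ 0 ∧ ss ≠ 0 ∧ cellAt arr ny nx - 0 < cellAt arr y x) :=
          fun h => h.1 rfl
        have nB3 : ¬((0:Int) = 2 ∧ k ≠ 0 ∧ cellAt arr ny nx - k < cellAt arr y x) :=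
          fun h => absurd h.1 (by norm_num)
        rw [if_neg hc, if_neg hc, if_neg nA3, if_neg nB3, max_eq_left hacc]
    · subst hp; subst hss; rw [hks]
      by_cases hj : cellAt arr ny nx < cellAt arr y x - k
      · have pA1 : k ≠ 0 ∧ (0:Int) = 0 ∧ cellAt arr ny nx < cellAt arr y x - k := ⟨hk, rfl, hj⟩
        have pB1 : (1:Int) = 1 ∧ k ≠ 0 ∧ cellAt arr ny nx < cellAt arr y x - k := ⟨rfl, hk, hj⟩
        rw [if_pos pA1, if_pos pB1, h0 0]
      · have nA1 : ¬(k ≠ 0 ∧ (0:Int) = 0 ∧ cellAt arr ny nx < cellAt arr y x - k) :=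
          fun h => hj h.2.2
        have nB1 : ¬((1:Int) = 1 ∧ k ≠ 0 ∧ cellAt arr ny nx < cellAt arr y x - k) :=
          fun h => hj h.2.2
        rw [if_neg nA1, if_neg nB1]
        by_cases hc : cellAt arr ny nx < cellAt arr y x
        · rw [if_pos hc, if_pos hc, h1 hk]
        · have nA3 : ¬(k ≠ 0 ∧ (0:Int) ≠ 0 ∧ cellAt arr ny nx - k < cellAt arr y x) :=
            fun h => h.2.1 rfl
          have nB3 : ¬((1:Int) = 2 ∧ k ≠ 0 ∧ cellAt arr ny nx - k < cellAt arr y x) :=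
            fun h => absurd h.1 (by norm_num)
          rw [if_neg hc, if_neg hc, if_neg nA3, if_neg nB3, max_eq_left hacc]
    · subst hp; rw [hks]
      have nA1 : ¬(k ≠ 0 ∧ ss = 0 ∧ cellAt arr ny nx < cellAt arr y x - k) :=
        fun h => hss h.2.1
      have nB1 : ¬((2:Int) = 1 ∧ k ≠ 0 ∧ cellAt arr ny nx < cellAt arr y x - k) :=
        fun h => absurd h.1 (by norm_num)
      rw [if_neg nA1, if_neg nB1]
      by_cases hc : cellAt arr ny nx < cellAt arr y x
      · rw [if_pos hc, if_pos hc, h2 hk ss hss]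
      · rw [if_neg hc, if_neg hc]
        by_cases hj : cellAt arr ny nx - k < cellAt arr y x
        · have pA3 : k ≠ 0 ∧ ss ≠ 0 ∧ cellAt arr ny nx - k < cellAt arr y x := ⟨hk, hss, hj⟩
          have pB3 : (2:Int) = 2 ∧ k ≠ 0 ∧ cellAt arr ny nx - k < cellAt arr y x := ⟨rfl, hk, hj⟩
          rw [if_pos pA3, if_pos pB3, h1 hk]
        · have nA3 : ¬(k ≠ 0 ∧ ss ≠ 0 ∧ cellAt arr ny nx - k < cellAt arr y x) :=
            fun h => hj h.2.2
          have nB3 : ¬((2:Int) = 2 ∧ k ≠ 0 ∧ cellAt arr ny nx - k < cellAt arr y x) :=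
            fun h => hj h.2.2
          rw [if_neg nA3, if_neg nB3, max_eq_left hacc]
  · rw [if_neg (fun h => hio ((inb_iff n nx ny).mp h)), if_neg hio, max_eq_left hacc]

-- a whole round: A's (f+1)-fuel DFS at a non-wall cell equals B's bestMove on the
-- round-f table, phase by phase
lemma bestMove_eq (arr : List (List Int)) (n k : Int) (f : Nat)
    (T : List (List (List Int))) (x y p ks ss : Int)
    (hin : (!isWallA n x y) = true)
    (hph : (p = 0 ∧ ks = 0) ∨ (p = 1 ∧ ks = k ∧ k ≠ 0 ∧ ss = 0) ∨
           (p = 2 ∧ ks = k ∧ k ≠ 0 ∧ ss ≠ 0))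
    (hIH : ∀ a b : Int, 0 ≤ a ∧ a < n ∧ 0 ≤ b ∧ b < n →
      (∀ s, lookT T 0 b a = dfsAux arr n f a b 0 s) ∧
      (k ≠ 0 → lookT T 1 b a = dfsAux arr n f a b k 0) ∧
      (k ≠ 0 → ∀ s, s ≠ 0 → lookT T 2 b a = dfsAux arr n f a b k s)) :
    dfsAux arr n (f+1) x y ks ss = bestMove arr n k T p x y := by
  have hwall : ¬ isWallA n x y = true := by revert hin; cases isWallA n x y <;> simp
  have hrange : PySem.List.pyRange 0 4 1 = ([0, 1, 2, 3] : List Int) := by decide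
  simp only [dfsAux, bestMove, cellB_eq]
  rw [if_neg hwall, hrange, mvEq, List.foldl_map]
  refine foldl_eq_inv (fun b : Int => 0 ≤ b) _ _ _ _ le_rfl ?_ ?_
  · intro b i hb
    dsimp only
    split_ifs
    all_goals first
      | exact hb
      | exact le_trans hb (le_max_left _ _)
  · intro b i hb
    exact stepPoint arr n k f T x y p ks ss _ _ b hph hb hIH

lemma lookT_stepT (arr : List (List Int)) (n k : Int) (T : List (List (List Int)))
    (p cy cx : Int) (hp0 : 0 ≤ p) (hp3 : p < 3)
    (hy0 : 0 ≤ cy) (hyn : cy < n) (hx0 : 0 ≤ cx) (hxn : cx < n) :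
    lookT (stepT arr n k T) p cy cx = bestMove arr n k T p cx cy := by
  unfold lookT stepT
  rw [PySem.List.pyGetD_map_pyRange_of_nonneg _ _ _ _ hp0 hp3,
    PySem.List.pyGetD_map_pyRange_of_nonneg _ _ _ _ hy0 hyn,
    PySem.List.pyGetD_map_pyRange_of_nonneg _ _ _ _ hx0 hxn]

lemma lookT_zeroT (n : Int) (p cy cx : Int) (hp0 : 0 ≤ p) (hp3 : p < 3)
    (hy0 : 0 ≤ cy) (hyn : cy < n) (hx0 : 0 ≤ cx) (hxn : cx < n) :
    lookT (zeroT n) p cy cx = 0 := by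
  unfold lookT zeroT
  rw [PySem.List.pyGetD_map_pyRange_of_nonneg _ _ _ _ hp0 hp3,
    PySem.List.pyGetD_map_pyRange_of_nonneg _ _ _ _ hy0 hyn,
    PySem.List.pyGetD_eq_getElem _ 0 hx0 (by simp; omega)]
  simp

-- the table after f relaxation rounds is the f-fuel DFS, phase by phase
lemma table_eq (arr : List (List Int)) (n k : Int) : ∀ (f : Nat) (a b : Int),
    0 ≤ a ∧ a < n ∧ 0 ≤ b ∧ b < n →
    (∀ s, lookT ((stepT arr n k)^[f] (zeroT n)) 0 b a = dfsAux arr n f a b 0 s) ∧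
    (k ≠ 0 → lookT ((stepT arr n k)^[f] (zeroT n)) 1 b a = dfsAux arr n f a b k 0) ∧
    (k ≠ 0 → ∀ s, s ≠ 0 → lookT ((stepT arr n k)^[f] (zeroT n)) 2 b a = dfsAux arr n f a b k s) := by
  intro f
  induction f with
  | zero =>
    intro a b hio
    have hz : ∀ p : Int, 0 ≤ p → p < 3 → lookT (zeroT n) p b a = 0 := fun p hp0 hp3 =>
      lookT_zeroT n p b a hp0 hp3 hio.2.2.1 hio.2.2.2 hio.1 hio.2.1
    refine ⟨fun s => ?_, fun _ => ?_, fun _ s _ => ?_⟩ <;>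
      · simp only [Function.iterate_zero, id]
        rw [hz _ (by norm_num) (by norm_num)]
        rfl
  | succ f ih =>
    intro a b hio
    have hin : (!isWallA n a b) = true := (inb_iff n a b).mpr hio
    rw [Function.iterate_succ_apply']
    refine ⟨fun s => ?_, fun hk => ?_, fun hk s hs => ?_⟩
    · rw [lookT_stepT arr n k _ 0 b a (by omega) (by omega) hio.2.2.1 hio.2.2.2 hio.1 hio.2.1]
      exact (bestMove_eq arr n k f _ a b 0 0 s hin (Or.inl ⟨rfl, rfl⟩) ih).symm
    · rw [lookT_stepT arr n k _ 1 b a (by omega) (by omega) hio.2.2.1 hio.2.2.2 hio.1 hio.2.1]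
      exact (bestMove_eq arr n k f _ a b 1 k 0 hin (Or.inr (Or.inl ⟨rfl, rfl, hk, rfl⟩)) ih).symm
    · rw [lookT_stepT arr n k _ 2 b a (by omega) (by omega) hio.2.2.1 hio.2.2.2 hio.1 hio.2.1]
      exact (bestMove_eq arr n k f _ a b 2 k s hin (Or.inr (Or.inr ⟨rfl, rfl, hk, hs⟩)) ih).symm

lemma iterate_fix {α : Type} (g : α → α) (T : α) (h : g T = T) :
    ∀ f : Nat, g^[f] T = T := by
  intro f
  induction f with
  | zero => rfl
  | succ f ih => rw [Function.iterate_succ_apply, h, ih]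

lemma iterT_eq (arr : List (List Int)) (n k : Int) :
    ∀ (f : Nat) (T : List (List (List Int))),
      iterT arr n k f T = (stepT arr n k)^[f] T := by
  intro f
  induction f with
  | zero => intro T; rfl
  | succ f ih =>
    intro T
    simp only [iterT]
    by_cases h : stepT arr n k T = T
    · rw [if_pos h, Function.iterate_succ_apply, h, iterate_fix _ _ h]
    · rw [if_neg h, ih, Function.iterate_succ_apply]

-- ===== VERDICT (by name: the statement is the Claim_ definition above) =====
theorem dfs_py_spec : Claim_equal_dfs_py := by
  unfold Claim_equal_dfs_py
  intro arr n x y k s _ _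
  unfold Spec_dfs_py dfs_py dfs_py_alt
  by_cases hw : x < 0 ∨ n ≤ x ∨ y < 0 ∨ n ≤ y
  · rw [if_pos hw]
    refine dfsAux_wall arr n _ x y k s ?_
    simp only [isWallA]
    rcases hw with h | h | h | h <;> simp [h]
  · rw [if_neg hw]
    show dfsAux arr n (pvFuel n) x y k s
      = lookT (iterT arr n k (3 * n * n + 4).toNat (zeroT n))
          (if k = 0 then 0 else if s = 0 then 1 else 2) y x
    have hio : 0 ≤ x ∧ x < n ∧ 0 ≤ y ∧ y < n := by omega
    have hR : (3 * n * n + 4).toNat = pvFuel n := by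
      obtain ⟨m, rfl⟩ : ∃ m : Nat, n = (m : Int) :=
        ⟨n.toNat, (Int.toNat_of_nonneg (by omega)).symm⟩
      rw [show (3 * (m : Int) * (m : Int) + 4) = ((3 * m * m + 4 : Nat) : Int) from by
        push_cast; ring]
      rw [Int.toNat_natCast, pvFuel, Int.toNat_natCast]
    rw [iterT_eq, hR]
    obtain ⟨h0, h1, h2⟩ := table_eq arr n k (pvFuel n) x y hio
    by_cases hk : k = 0
    · subst hk
      rw [if_pos rfl, h0 s]
    · rw [if_neg hk]
      by_cases hs : s = 0
      · subst hs
        rw [if_pos rfl, h1 hk]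
      · rw [if_neg hs, h2 hk s hs]
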